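-- pv_equiv track=rewrite | github.com/spacealab/chatbot_side | chatbot.py | find_original_question
-- ===== SOURCE A (Python) =====
-- question_variants = {
--     "Where is lecturing hall XXX?": [
--         "What is the location of lecturing hall XXX?",
--         "Where is lecturing hall XXX located?",
--         "How do I reach lecturing hall XXX?"
--     ],
--     "How do I learn Excel?": [
--         "What is the best way to learn Excel?",
--         "Can you tell me how to start learning Excel?"
--     ],
--     "What is language?": [
--         "Can you explain communication?",
--         "Tell me about intraction.",
--         "What does contact mean?"
--     ]
-- }
--
-- def find_original_question(user_input):
--     for original, variants in question_variants.items():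
--         if user_input.strip().lower() == original.strip().lower():
--             return original
--         for variant in variants:
--             if user_input.strip().lower() == variant.strip().lower():
--                 return original
--     return None
-- ===== SOURCE B (Python) =====
-- question_variants = {
--     "Where is lecturing hall XXX?": [
--         "What is the location of lecturing hall XXX?",
--         "Where is lecturing hall XXX located?",
--         "How do I reach lecturing hall XXX?"
--     ],
--     "How do I learn Excel?": [
--         "What is the best way to learn Excel?",
--         "Can you tell me how to start learning Excel?"
--     ],
--     "What is language?": [
--         "Can you explain communication?",
--         "Tell me about intraction.",
--         "What does contact mean?"
--     ]
-- }
--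
-- _reverse = {}
-- for _orig, _vars in question_variants.items():
--     _reverse[_orig.strip().lower()] = _orig
--     for _v in _vars:
--         _reverse[_v.strip().lower()] = _orig
--
-- def find_original_question(user_input):
--     return _reverse.get(user_input.strip().lower())
-- ===== Notes on version B (the rewrite author's own statement) =====
-- stated objective: simpler
-- what changed: Replaced the nested per-call scan over the variants dict (re-normalizing every key and variant on each call) with a reverse-lookup table built once at module load mapping each normalized key/variant to its canonical question, so each call is a single dict lookup.
import Mathlib
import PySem

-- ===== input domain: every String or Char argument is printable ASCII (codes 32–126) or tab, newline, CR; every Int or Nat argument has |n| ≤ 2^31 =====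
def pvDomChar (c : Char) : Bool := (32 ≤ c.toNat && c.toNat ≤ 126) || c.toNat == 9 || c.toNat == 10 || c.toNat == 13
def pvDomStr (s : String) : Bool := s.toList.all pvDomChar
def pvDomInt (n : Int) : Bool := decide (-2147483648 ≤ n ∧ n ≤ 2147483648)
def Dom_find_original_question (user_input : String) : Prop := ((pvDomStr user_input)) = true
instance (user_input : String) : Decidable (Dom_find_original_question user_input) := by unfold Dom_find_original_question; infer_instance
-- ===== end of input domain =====

-- B replaces A's per-call nested scan over the variants dict with a reverse-lookup
-- table built once (normalized key/variant -> canonical question); simpler per-call logic.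

-- shared module-level constant (the Python dict question_variants, as an assoc list)
def question_variants : List (String × List String) :=
  [("Where is lecturing hall XXX?",
     ["What is the location of lecturing hall XXX?",
      "Where is lecturing hall XXX located?",
      "How do I reach lecturing hall XXX?"]),
   ("How do I learn Excel?",
     ["What is the best way to learn Excel?",
      "Can you tell me how to start learning Excel?"]),
   ("What is language?",
     ["Can you explain communication?",
      "Tell me about intraction.",
      "What does contact mean?"])]

-- s.strip().lower()
def pvNorm (s : String) : String := PySem.Str.lower (PySem.Str.strip s)

-- ===== PORT A =====
-- inner loop: for variant in variants: if user_input.strip().lower() == variant.strip().lower(): return original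
def pvScanVariants (user_input original : String) : List String → Option String
  | [] => none
  | v :: rest =>
    if pvNorm user_input = pvNorm v then some original
    else pvScanVariants user_input original rest

-- outer loop over question_variants.items()
def pvFindLoop (user_input : String) : List (String × List String) → Option String
  | [] => none
  | (original, variants) :: rest =>
    if pvNorm user_input = pvNorm original then some original
    else (pvScanVariants user_input original variants).or (pvFindLoop user_input rest)

def find_original_question (user_input : String) : Option String :=
  pvFindLoop user_input question_variants

-- ===== PORT B =====
-- the reverse table built once from question_variants (Source B's module-level loop)
def pvReverse : PySem.Dict String String :=
  question_variants.foldl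
    (fun d p =>
      let d := d.insert (pvNorm p.1) p.1
      p.2.foldl (fun d v => d.insert (pvNorm v) p.1) d)
    PySem.Dict.empty

def find_original_question_alt (user_input : String) : Option String :=
  pvReverse.get? (pvNorm user_input)

-- ===== PRECONDITION & SPEC =====
def Spec_find_original_question (user_input : String) (out : Option String) : Prop := out = find_original_question_alt user_input
instance (user_input : String) (out : Option String) : Decidable (Spec_find_original_question user_input out) := by unfold Spec_find_original_question; infer_instance

-- ===== CLAIM (what is proved, stated in full; the proofs are below) =====
def Claim_equal_find_original_question : Prop := ∀ (user_input : String), Dom_find_original_question user_input → Spec_find_original_question user_input (find_original_question user_input)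

-- ===== LEMMAS AND PROOFS =====

-- the built table, as a literal
lemma pvReverse_eq : pvReverse = PySem.Dict.mk
    [("where is lecturing hall xxx?", "Where is lecturing hall XXX?"),
     ("what is the location of lecturing hall xxx?", "Where is lecturing hall XXX?"),
     ("where is lecturing hall xxx located?", "Where is lecturing hall XXX?"),
     ("how do i reach lecturing hall xxx?", "Where is lecturing hall XXX?"),
     ("how do i learn excel?", "How do I learn Excel?"),
     ("what is the best way to learn excel?", "How do I learn Excel?"),
     ("can you tell me how to start learning excel?", "How do I learn Excel?"),
     ("what is language?", "What is language?"),
     ("can you explain communication?", "What is language?"),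
     ("tell me about intraction.", "What is language?"),
     ("what does contact mean?", "What is language?")] := by rfl

lemma pvNorm_l1 : pvNorm "Where is lecturing hall XXX?" = "where is lecturing hall xxx?" := by decide
lemma pvNorm_l2 : pvNorm "What is the location of lecturing hall XXX?" = "what is the location of lecturing hall xxx?" := by decide
lemma pvNorm_l3 : pvNorm "Where is lecturing hall XXX located?" = "where is lecturing hall xxx located?" := by decide
lemma pvNorm_l4 : pvNorm "How do I reach lecturing hall XXX?" = "how do i reach lecturing hall xxx?" := by decide
lemma pvNorm_l5 : pvNorm "How do I learn Excel?" = "how do i learn excel?" := by decide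
lemma pvNorm_l6 : pvNorm "What is the best way to learn Excel?" = "what is the best way to learn excel?" := by decide
lemma pvNorm_l7 : pvNorm "Can you tell me how to start learning Excel?" = "can you tell me how to start learning excel?" := by decide
lemma pvNorm_l8 : pvNorm "What is language?" = "what is language?" := by decide
lemma pvNorm_l9 : pvNorm "Can you explain communication?" = "can you explain communication?" := by decide
lemma pvNorm_l10 : pvNorm "Tell me about intraction." = "tell me about intraction." := by decide
lemma pvNorm_l11 : pvNorm "What does contact mean?" = "what does contact mean?" := by decide

lemma get?_cons' (k v t : String) (rest : List (String × String)) :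
    (PySem.Dict.mk ((k, v) :: rest)).get? t
      = if t = k then some v else (PySem.Dict.mk rest).get? t := by
  rw [PySem.Dict.get?_mk_cons]
  by_cases h : t = k
  · subst h; simp
  · have hb : (k == t) = false := by
      simp [beq_eq_false_iff_ne]; exact fun e => h e.symm
    rw [hb, if_neg h]; rfl

lemma get?_nil (t : String) : (PySem.Dict.mk ([] : List (String × String))).get? t = none := rfl

-- ===== VERDICT (by name: the statement is the Claim_ definition above) =====
theorem find_original_question_spec : Claim_equal_find_original_question := by
  intro u _
  unfold Spec_find_original_question find_original_question find_original_question_alt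
  rw [pvReverse_eq]
  simp only [question_variants, pvFindLoop, pvScanVariants,
    pvNorm_l1, pvNorm_l2, pvNorm_l3, pvNorm_l4, pvNorm_l5, pvNorm_l6,
    pvNorm_l7, pvNorm_l8, pvNorm_l9, pvNorm_l10, pvNorm_l11,
    get?_cons', get?_nil]
  by_cases h1 : pvNorm u = "where is lecturing hall xxx?"
  · simp [h1]
  by_cases h2 : pvNorm u = "what is the location of lecturing hall xxx?"
  · simp [h2]
  by_cases h3 : pvNorm u = "where is lecturing hall xxx located?"
  · simp [h3]
  by_cases h4 : pvNorm u = "how do i reach lecturing hall xxx?"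
  · simp [h4]
  by_cases h5 : pvNorm u = "how do i learn excel?"
  · simp [h5]
  by_cases h6 : pvNorm u = "what is the best way to learn excel?"
  · simp [h6]
  by_cases h7 : pvNorm u = "can you tell me how to start learning excel?"
  · simp [h7]
  by_cases h8 : pvNorm u = "what is language?"
  · simp [h8]
  by_cases h9 : pvNorm u = "can you explain communication?"
  · simp [h9]
  by_cases h10 : pvNorm u = "tell me about intraction."
  · simp [h10]
  by_cases h11 : pvNorm u = "what does contact mean?"
  · simp [h11]
  simp [h1, h2, h3, h4, h5, h6, h7, h8, h9, h10, h11]
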